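-- pv_equiv track=rewrite | github.com/communitiesuk/funding-service-design-account-store | db/models/account.py | _fund_short_name_to_highest_role_map
-- ===== SOURCE A (Python) =====
-- from typing import Mapping
--
-- _ROLE_HIERARCHY = [
--     "LEAD_ASSESSOR",
--     "ASSESSOR",
--     "COMMENTER",
-- ]
--
-- def _fund_short_name_to_highest_role_map(roles: list[str]) -> Mapping[str, str]:
--     roles_with_fund_prefix = tuple(f"_{rh}" for rh in _ROLE_HIERARCHY)
--     filtered_roles = [r for r in roles if r.endswith(roles_with_fund_prefix)]
--
--     fund_short_name_to_roles_list = {}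
--     for role in filtered_roles:
--         fund_short_name, sub_role = role.split("_", 1)
--         if fund_short_name in fund_short_name_to_roles_list:
--             fund_short_name_to_roles_list[fund_short_name].append(sub_role)
--         else:
--             fund_short_name_to_roles_list[fund_short_name] = [sub_role]
--
--     fund_short_name_to_highest_role = {}
--     for fund_short_name, roles_list in fund_short_name_to_roles_list.items():
--         highest_role, *_ = sorted(roles_list, key=lambda x: _ROLE_HIERARCHY.index(x))
--         fund_short_name_to_highest_role[fund_short_name] = highest_role
--
--     return fund_short_name_to_highest_role
-- ===== SOURCE B (Python) =====
-- from typing import Mapping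
--
-- _ROLE_HIERARCHY = [
--     "LEAD_ASSESSOR",
--     "ASSESSOR",
--     "COMMENTER",
-- ]
--
-- def _fund_short_name_to_highest_role_map(roles: list[str]) -> Mapping[str, str]:
--     suffixes = tuple(f"_{rh}" for rh in _ROLE_HIERARCHY)
--     best = {}  # fund_short_name -> (rank, sub_role), replaced only on strictly better rank
--     for role in roles:
--         if not role.endswith(suffixes):
--             continue
--         fund_short_name, sub_role = role.split("_", 1)
--         rank = _ROLE_HIERARCHY.index(sub_role)
--         current = best.get(fund_short_name)
--         if current is None or rank < current[0]:
--             best[fund_short_name] = (rank, sub_role)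
--     return {fund: pair[1] for fund, pair in best.items()}
-- ===== Notes on version B (the rewrite author's own statement) =====
-- stated objective: simpler
-- what changed: Single pass keeping per-fund (best_rank, best_sub_role) with strict-improvement replacement, instead of grouping roles into per-fund lists and sorting each list by hierarchy rank to take its head.
import Mathlib
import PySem

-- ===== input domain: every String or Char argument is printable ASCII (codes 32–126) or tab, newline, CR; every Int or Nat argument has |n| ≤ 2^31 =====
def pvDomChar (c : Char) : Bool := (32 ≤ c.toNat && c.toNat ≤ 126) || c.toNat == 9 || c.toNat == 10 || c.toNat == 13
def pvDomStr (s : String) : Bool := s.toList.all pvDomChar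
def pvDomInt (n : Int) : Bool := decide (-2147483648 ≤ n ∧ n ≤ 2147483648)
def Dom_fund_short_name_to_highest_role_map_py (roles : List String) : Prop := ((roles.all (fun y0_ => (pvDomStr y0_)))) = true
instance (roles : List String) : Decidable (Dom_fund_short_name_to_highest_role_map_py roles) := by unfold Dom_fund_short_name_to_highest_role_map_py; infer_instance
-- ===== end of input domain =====

-- B replaces A's group-into-lists-then-sort-each-group by a single pass that keeps,
-- per fund prefix, the (rank, sub_role) pair with the strictly smallest hierarchy rank (simpler, no sort).

-- ===== PORT A =====
def pvHier : List String := ["LEAD_ASSESSOR", "ASSESSOR", "COMMENTER"]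

-- tuple(f"_{rh}" for rh in _ROLE_HIERARCHY)
def pvSuffixes : List String := pvHier.map (fun rh => String.ofList ('_' :: rh.toList))

-- r.endswith(roles_with_fund_prefix)  (endswith on a tuple = any of the suffixes)
def pvEndsOk (r : String) : Bool := pvSuffixes.any (fun suf => PySem.Str.endswith r suf)

-- fund_short_name, sub_role = role.split("_", 1); the fallback branch is unreachable for
-- roles that passed the endswith filter (they contain '_', so the split has two parts).
def pvSplit1 (r : String) : String × String :=
  match PySem.Str.splitMax? r "_" 1 with
  | some (f :: s :: _) => (f, s)
  | _ => ("", r)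

-- _ROLE_HIERARCHY.index(x); Python raises ValueError when x is not in the hierarchy —
-- exactly those inputs are excluded by Pre_ below, where getD 0 is a mere placeholder.
def pvRank (s : String) : Nat := (PySem.List.index? pvHier s).getD 0

def fund_short_name_to_highest_role_map_py (roles : List String) : List (String × String) :=
  let filtered := roles.filter pvEndsOk
  let d1 : PySem.Dict String (List String) :=
    filtered.foldl (fun d role =>
      let p := pvSplit1 role
      if d.contains p.1 then d.insert p.1 (d.getD p.1 [] ++ [p.2])
      else d.insert p.1 [p.2]) PySem.Dict.empty
  let d2 : PySem.Dict String String :=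
    d1.items.foldl (fun d q =>
      let highest :=
        match PySem.List.sorted q.2 (fun x => pvRank x) false with
        | h :: _ => h
        | [] => ""   -- unreachable: every grouped list is nonempty
      d.insert q.1 highest) PySem.Dict.empty
  d2.items

-- ===== PORT B =====
def fund_short_name_to_highest_role_map_py_alt (roles : List String) : List (String × String) :=
  let best : PySem.Dict String (Nat × String) :=
    roles.foldl (fun d role =>
      if pvEndsOk role then
        let p := pvSplit1 role
        let rank := pvRank p.2
        match d.get? p.1 with
        | none => d.insert p.1 (rank, p.2)
        | some current => if rank < current.1 then d.insert p.1 (rank, p.2) else d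
      else d) PySem.Dict.empty
  best.items.map (fun q => (q.1, q.2.2))

-- ===== PRECONDITION & SPEC =====
-- Pre_ excludes exactly the inputs on which Python A raises ValueError: a role that ends with a
-- hierarchy suffix but whose part after the FIRST underscore is not itself a hierarchy role
-- (e.g. "C_F_ASSESSOR"), on which _ROLE_HIERARCHY.index raises (B raises there identically).
def Pre_fund_short_name_to_highest_role_map_py (roles : List String) : Prop :=
  (roles.all (fun r =>
    !pvEndsOk r ||
    (match PySem.Str.splitMax? r "_" 1 with
     | some (_ :: s :: _) => pvHier.contains s
     | _ => false))) = true
instance (roles : List String) : Decidable (Pre_fund_short_name_to_highest_role_map_py roles) := by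
  unfold Pre_fund_short_name_to_highest_role_map_py; infer_instance

def pvWitness_fund_short_name_to_highest_role_map_py : List String :=
  ["COF_ASSESSOR", "COF_LEAD_ASSESSOR", "NSTF_COMMENTER", "admin"]

def Spec_fund_short_name_to_highest_role_map_py (roles : List String) (out : List (String × String)) : Prop := out = fund_short_name_to_highest_role_map_py_alt roles
instance (roles : List String) (out : List (String × String)) : Decidable (Spec_fund_short_name_to_highest_role_map_py roles out) := by unfold Spec_fund_short_name_to_highest_role_map_py; infer_instance

-- ===== CLAIM (what is proved, stated in full; the proofs are below) =====
def Claim_equal_fund_short_name_to_highest_role_map_py : Prop := ∀ (roles : List String), Dom_fund_short_name_to_highest_role_map_py roles → Pre_fund_short_name_to_highest_role_map_py roles → Spec_fund_short_name_to_highest_role_map_py roles (fund_short_name_to_highest_role_map_py roles)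

-- ===== LEMMAS AND PROOFS =====

-- the (fund, sub_role) pairs both programs actually process
def pvPairs (roles : List String) : List (String × String) :=
  (roles.filter pvEndsOk).map pvSplit1

-- the sub_roles grouped under fund f, in order of appearance
def pvSubs (roles : List String) (f : String) : List String :=
  ((pvPairs roles).filter (fun p => p.1 == f)).map (fun p => p.2)

-- B's per-fund accumulator step, on the already-split pairs
def pvBStep (d : PySem.Dict String (Nat × String)) (p : String × String) : PySem.Dict String (Nat × String) :=
  match d.get? p.1 with
  | none => d.insert p.1 (pvRank p.2, p.2)
  | some current => if pvRank p.2 < current.1 then d.insert p.1 (pvRank p.2, p.2) else d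

-- B's per-fund update seen through a single fund's slot
def pvUpd (c : Option (Nat × String)) (s : String) : Option (Nat × String) :=
  match c with
  | none => some (pvRank s, s)
  | some current => if pvRank s < current.1 then some (pvRank s, s) else some current

-- "first element with minimal rank" as a left fold
def pvFStep (c : Option String) (x : String) : Option String :=
  match c with
  | none => some x
  | some y => if pvRank x < pvRank y then some x else some y

theorem pvAStep_eq_modify :
    (fun (d : PySem.Dict String (List String)) (role : String) =>
      let p := pvSplit1 role
      if d.contains p.1 then d.insert p.1 (d.getD p.1 [] ++ [p.2])
      else d.insert p.1 [p.2])
    = (fun d role => d.modify (pvSplit1 role).1 [] (fun l => l ++ [(pvSplit1 role).2])) := by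
  funext d role
  by_cases h : d.contains (pvSplit1 role).1
  · simp [h, PySem.Dict.modify]
  · simp only [eq_false_of_ne_true h]
    rw [PySem.Dict.getD_of_not_contains _ _ (eq_false_of_ne_true h)]
    simp [PySem.Dict.modify, PySem.Dict.getD_of_not_contains _ _ (eq_false_of_ne_true h)]

theorem pvBStep_get?_self (d : PySem.Dict String (Nat × String)) (p : String × String) :
    (pvBStep d p).get? p.1 = pvUpd (d.get? p.1) p.2 := by
  unfold pvBStep pvUpd
  cases hd : d.get? p.1 with
  | none => simp [PySem.Dict.get?_insert_self]
  | some cur =>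
    by_cases hlt : pvRank p.2 < cur.1
    · simp [hlt, PySem.Dict.get?_insert_self]
    · simp [hlt, hd]

theorem pvBStep_get?_ne (d : PySem.Dict String (Nat × String)) (p : String × String)
    (f : String) (h : p.1 ≠ f) : (pvBStep d p).get? f = d.get? f := by
  unfold pvBStep
  cases hd : d.get? p.1 with
  | none => simp [PySem.Dict.get?_insert_of_ne _ _ (Ne.symm h)]
  | some cur =>
    by_cases hlt : pvRank p.2 < cur.1
    · simp [hlt, PySem.Dict.get?_insert_of_ne _ _ (Ne.symm h)]
    · simp [hlt]

theorem pvBfold_get? (l : List (String × String)) (f : String) :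
    ∀ d : PySem.Dict String (Nat × String),
      (l.foldl pvBStep d).get? f
        = ((l.filter (fun p => p.1 == f)).map (fun p => p.2)).foldl pvUpd (d.get? f) := by
  induction l with
  | nil => intro d; simp
  | cons p t ih =>
    intro d
    by_cases h : p.1 = f
    · simp only [List.foldl_cons, List.filter_cons, h, beq_self_eq_true, if_pos, List.map_cons]
      have hs : (pvBStep d p).get? f = pvUpd (d.get? f) p.2 := by
        rw [← h]; exact pvBStep_get?_self d p
      rw [ih, hs]
    · have hb : (p.1 == f) = false := beq_eq_false_iff_ne.mpr h
      simp only [List.foldl_cons, List.filter_cons, hb, Bool.false_eq_true, if_neg,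
        not_false_eq_true]
      rw [ih, pvBStep_get?_ne _ _ _ h]

theorem pvUpd_eq_fstep (l : List String) :
    ∀ c : Option String,
      l.foldl pvUpd (c.map (fun s => (pvRank s, s)))
        = (l.foldl pvFStep c).map (fun s => (pvRank s, s)) := by
  induction l with
  | nil => intro c; simp
  | cons x t ih =>
    intro c
    have hstep : pvUpd (c.map (fun s => (pvRank s, s))) x
        = (pvFStep c x).map (fun s => (pvRank s, s)) := by
      cases c with
      | none => simp [pvUpd, pvFStep]
      | some y =>
        by_cases hlt : pvRank x < pvRank y
        · simp [pvUpd, pvFStep, hlt]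
        · simp [pvUpd, pvFStep, hlt]
    simp only [List.foldl_cons, hstep, ih]

theorem pvInsertBy_head? (x : String) (acc : List String) :
    (PySem.List.insertBy (fun a b => decide (pvRank a < pvRank b)) x acc).head?
      = pvFStep acc.head? x := by
  cases acc with
  | nil => simp [PySem.List.insertBy, pvFStep]
  | cons a t =>
    by_cases hlt : pvRank x < pvRank a
    · simp [PySem.List.insertBy, pvFStep, hlt]
    · simp [PySem.List.insertBy, pvFStep, hlt]

theorem pvSorted_head? (l : List String) :
    (PySem.List.sorted l (fun x => pvRank x) false).head? = l.foldl pvFStep none := by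
  rw [PySem.List.sorted_eq_foldl_insertBy]
  have gen : ∀ (t : List String) (acc : List String),
      ((t.foldl (fun acc x => PySem.List.insertBy (fun a b => decide (pvRank a < pvRank b)) x acc) acc).head?)
        = t.foldl pvFStep acc.head? := by
    intro t
    induction t with
    | nil => intro acc; simp
    | cons x s ih =>
      intro acc
      simp only [List.foldl_cons]
      rw [ih, pvInsertBy_head?]
  simpa using gen l []

theorem pvFStep_isSome (l : List String) :
    ∀ y : String, (l.foldl pvFStep (some y)).isSome = true := by
  induction l with
  | nil => intro y; simp
  | cons x t ih =>
    intro y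
    simp only [List.foldl_cons, pvFStep]
    by_cases hlt : pvRank x < pvRank y
    · simp only [if_pos hlt]; exact ih x
    · simp only [if_neg hlt]; exact ih y


-- grouped/accumulated dictionaries, expressed over the split pairs
def pvDA (roles : List String) : PySem.Dict String (List String) :=
  (pvPairs roles).foldl (fun d p => d.modify p.1 [] (fun l => l ++ [p.2])) PySem.Dict.empty

def pvDB (roles : List String) : PySem.Dict String (Nat × String) :=
  (pvPairs roles).foldl pvBStep PySem.Dict.empty

def pvHead (l : List String) : String :=
  match PySem.List.sorted l (fun x => pvRank x) false with
  | h :: _ => h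
  | [] => ""

theorem pvA_unfold (roles : List String) :
    fund_short_name_to_highest_role_map_py roles
      = ((pvDA roles).items.foldl (fun d q => d.insert q.1 (pvHead q.2)) PySem.Dict.empty).items := by
  unfold fund_short_name_to_highest_role_map_py pvDA pvPairs pvHead
  rw [pvAStep_eq_modify, List.foldl_map]

theorem pvB_unfold (roles : List String) :
    fund_short_name_to_highest_role_map_py_alt roles
      = (pvDB roles).items.map (fun q => (q.1, q.2.2)) := by
  unfold fund_short_name_to_highest_role_map_py_alt pvDB pvPairs
  rw [← List.foldl_filter, List.foldl_map]
  rfl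

theorem pvDA_keys (roles : List String) :
    (pvDA roles).keys = PySem.Set.ofList ((pvPairs roles).map (fun p => p.1)) :=
  PySem.Dict.keys_foldl_modify_key (pvPairs roles) (fun p => p.1) [] (fun _ p l => l ++ [p.2]) PySem.Dict.empty

theorem pvBStep_keys (d : PySem.Dict String (Nat × String)) (p : String × String) :
    (pvBStep d p).keys = PySem.Set.add d.keys p.1 := by
  unfold pvBStep
  cases hd : d.get? p.1 with
  | none =>
    have hmem : p.1 ∉ d.keys := (PySem.Dict.get?_eq_none_iff_not_mem_keys d p.1).mp hd
    have hc : d.contains p.1 = false := by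
      by_contra hc
      exact hmem ((PySem.Dict.contains_iff_mem_keys d p.1).mp (by simpa using hc))
    rw [PySem.Dict.keys_insert_of_not_contains d _ hc]
    simp [PySem.Set.add, PySem.Set.contains, hmem]
  | some cur =>
    have hmem : p.1 ∈ d.keys := by
      have : d.contains p.1 = true := by
        rw [PySem.Dict.contains_eq_isSome_get?, hd]; rfl
      exact (PySem.Dict.contains_iff_mem_keys d p.1).mp this
    have hadd : PySem.Set.add d.keys p.1 = d.keys := by
      simp [PySem.Set.add, PySem.Set.contains, hmem]
    by_cases hlt : pvRank p.2 < cur.1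
    · simp only [hlt, if_pos]
      rw [PySem.Dict.keys_insert_of_contains d _ ((PySem.Dict.contains_iff_mem_keys d p.1).mpr hmem)]
      exact hadd.symm
    · simp [hlt, hadd]

theorem pvBfold_keys (l : List (String × String)) :
    ∀ d : PySem.Dict String (Nat × String),
      (l.foldl pvBStep d).keys = PySem.Set.update d.keys (l.map (fun p => p.1)) := by
  induction l with
  | nil => intro d; simp [PySem.Set.update]
  | cons p t ih =>
    intro d
    simp only [List.foldl_cons, List.map_cons, PySem.Set.update, List.foldl_cons]
    rw [ih, ← pvBStep_keys]
    rfl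

theorem pvDB_keys (roles : List String) :
    (pvDB roles).keys = PySem.Set.ofList ((pvPairs roles).map (fun p => p.1)) := by
  unfold pvDB
  rw [pvBfold_keys]
  rfl

theorem pvDA_getD (roles : List String) (f : String) :
    (pvDA roles).getD f [] = pvSubs roles f := by
  unfold pvDA pvSubs
  rw [PySem.Dict.getD_foldl_modify_append]
  simp

theorem pvDB_get? (roles : List String) (f : String) :
    (pvDB roles).get? f
      = ((pvSubs roles f).foldl pvFStep none).map (fun s => (pvRank s, s)) := by
  unfold pvDB pvSubs
  rw [pvBfold_get?]
  rw [PySem.Dict.get?_empty]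
  have := pvUpd_eq_fstep (((pvPairs roles).filter (fun p => p.1 == f)).map (fun p => p.2)) none
  simpa using this

theorem pv_pointwise (roles : List String) (f : String)
    (hne : pvSubs roles f ≠ []) :
    pvHead ((pvDA roles).getD f []) = ((pvDB roles).getD f (0, "")).2 := by
  rw [pvDA_getD]
  obtain ⟨x, t, hxt⟩ : ∃ x t, pvSubs roles f = x :: t := by
    cases h : pvSubs roles f with
    | nil => exact absurd h hne
    | cons x t => exact ⟨x, t, rfl⟩
  have hsome : ∃ m, (pvSubs roles f).foldl pvFStep none = some m := by
    rw [hxt]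
    simp only [List.foldl_cons, pvFStep]
    have := pvFStep_isSome t x
    exact Option.isSome_iff_exists.mp this
  obtain ⟨m, hm⟩ := hsome
  have hget : (pvDB roles).get? f = some (pvRank m, m) := by
    rw [pvDB_get?, hm]; rfl
  rw [PySem.Dict.getD_of_get?_eq_some _ _ hget]
  have hhead : (PySem.List.sorted (pvSubs roles f) (fun x => pvRank x) false).head? = some m := by
    rw [pvSorted_head?, hm]
  unfold pvHead
  cases hs : PySem.List.sorted (pvSubs roles f) (fun x => pvRank x) false with
  | nil => rw [hs] at hhead; simp at hhead
  | cons h' t' =>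
    rw [hs] at hhead
    simp at hhead
    simpa using hhead

theorem pv_main (roles : List String) :
    fund_short_name_to_highest_role_map_py roles = fund_short_name_to_highest_role_map_py_alt roles := by
  have hndA : (pvDA roles).keys.Nodup := by
    rw [pvDA_keys]; exact PySem.Set.nodup_ofList _
  have hndB : (pvDB roles).keys.Nodup := by
    rw [pvDB_keys]; exact PySem.Set.nodup_ofList _
  rw [pvA_unfold, pvB_unfold]
  rw [PySem.Dict.items_foldl_insert_fresh (pvDA roles).items (fun q => q.1) (fun q => pvHead q.2)
        PySem.Dict.empty (by intro a _; simp) (by exact hndA)]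
  rw [PySem.Dict.items_eq_map_keys (pvDA roles) hndA []]
  rw [PySem.Dict.items_eq_map_keys (pvDB roles) hndB (0, "")]
  have hie : (PySem.Dict.empty : PySem.Dict String String).items = [] := rfl
  simp only [hie, List.nil_append, List.map_map]
  rw [pvDA_keys, pvDB_keys]
  apply List.map_congr_left
  intro f hf
  have hmem : f ∈ (pvPairs roles).map (fun p => p.1) := by
    have := PySem.Set.mem_ofList ((pvPairs roles).map (fun p => p.1)) f
    exact this.mp hf
  have hne : pvSubs roles f ≠ [] := by
    obtain ⟨p, hp, hpf⟩ := List.mem_map.mp hmem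
    unfold pvSubs
    have : p ∈ (pvPairs roles).filter (fun q => q.1 == f) := by
      rw [List.mem_filter]
      exact ⟨hp, by simp [hpf]⟩
    intro hnil
    rw [List.map_eq_nil_iff] at hnil
    rw [hnil] at this
    simp at this
  have := pv_pointwise roles f hne
  simp only [Function.comp]
  rw [this]

-- ===== VERDICT (by name: the statement is the Claim_ definition above) =====
theorem fund_short_name_to_highest_role_map_py_spec : Claim_equal_fund_short_name_to_highest_role_map_py := by
  intro roles _ _
  unfold Spec_fund_short_name_to_highest_role_map_py
  exact pv_main roles
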